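-- pv_equiv track=rewrite | github.com/hdavis2100/Real-Time-Website-Analytics | dashboard/data_access.py | _preferred_live_status
-- ===== SOURCE A (Python) =====
-- from typing import Sequence
--
-- def _status_rank(status: object) -> int:
--     return 0 if str(status or "").strip().lower() == "queued" else 1
--
-- def _preferred_live_status(rows: Sequence[dict[str, object]]) -> str:
--     winner = "running"
--     winner_rank = _status_rank(winner)
--     for row in rows:
--         candidate = str(row.get("status") or "").strip().lower()
--         if not candidate:
--             continue
--         candidate_rank = _status_rank(candidate)
--         if candidate_rank >= winner_rank:
--             winner = candidate
--             winner_rank = candidate_rank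
--     return winner
-- ===== SOURCE B (Python) =====
-- from typing import Sequence
--
-- def _preferred_live_status(rows: Sequence[dict[str, object]]) -> str:
--     for row in reversed(rows):
--         candidate = str(row.get("status") or "").strip().lower()
--         if candidate and candidate != "queued":
--             return candidate
--     return "running"
-- ===== Notes on version B (the rewrite author's own statement) =====
-- stated objective: simpler
-- what changed: Replaces the forward accumulation of a (winner, rank) pair with its rank helper by a reverse scan that returns the first non-empty, non-'queued' normalized status, defaulting to 'running'.
import Mathlib
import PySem

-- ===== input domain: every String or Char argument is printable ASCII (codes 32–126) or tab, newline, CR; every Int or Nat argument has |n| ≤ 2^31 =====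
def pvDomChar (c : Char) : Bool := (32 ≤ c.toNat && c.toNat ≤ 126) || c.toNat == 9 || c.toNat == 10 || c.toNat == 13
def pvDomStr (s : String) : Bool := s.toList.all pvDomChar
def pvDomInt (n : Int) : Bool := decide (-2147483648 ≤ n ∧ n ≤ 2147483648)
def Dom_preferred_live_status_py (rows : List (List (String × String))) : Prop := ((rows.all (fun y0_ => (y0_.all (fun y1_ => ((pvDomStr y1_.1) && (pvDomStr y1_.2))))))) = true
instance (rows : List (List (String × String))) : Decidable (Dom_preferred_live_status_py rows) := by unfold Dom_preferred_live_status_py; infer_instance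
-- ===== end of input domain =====

-- B replaces A's forward (winner, rank) accumulation with a reverse scan returning the first
-- non-empty non-'queued' normalized status (default "running"); objective: simpler, same cost.

-- ===== PORT A =====
-- candidate = str(row.get("status") or "").strip().lower()   (shared expression of both Pythons)
def pvCandidate (row : List (String × String)) : String :=
  PySem.Str.lower (PySem.Str.strip (PySem.Dict.getD (PySem.Dict.mk row) "status" ""))

-- _status_rank(status): 0 if str(status or "").strip().lower() == "queued" else 1
def pvStatusRank (status : String) : Int :=
  if PySem.Str.lower (PySem.Str.strip (if status = "" then "" else status)) = "queued" then 0 else 1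

-- the body of A's for-loop over (winner, winner_rank)
def pvLoopBody (st : String × Int) (row : List (String × String)) : String × Int :=
  let candidate := pvCandidate row
  if candidate = "" then st
  else
    let candidate_rank := pvStatusRank candidate
    if st.2 ≤ candidate_rank then (candidate, candidate_rank) else st

def preferred_live_status_py (rows : List (List (String × String))) : String :=
  (rows.foldl pvLoopBody ("running", pvStatusRank "running")).1

-- ===== PORT B =====
-- for row in reversed(rows): return the first non-empty, non-'queued' candidate; else "running"
def pvAltGo : List (List (String × String)) → String
  | [] => "running"
  | row :: rest =>
      let candidate := pvCandidate row
      if candidate ≠ "" ∧ candidate ≠ "queued" then candidate else pvAltGo rest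

def preferred_live_status_py_alt (rows : List (List (String × String))) : String :=
  pvAltGo rows.reverse

-- ===== PRECONDITION & SPEC =====
def Spec_preferred_live_status_py (rows : List (List (String × String))) (out : String) : Prop := out = preferred_live_status_py_alt rows
instance (rows : List (List (String × String))) (out : String) : Decidable (Spec_preferred_live_status_py rows out) := by unfold Spec_preferred_live_status_py; infer_instance

-- ===== CLAIM (what is proved, stated in full; the proofs are below) =====
def Claim_equal_preferred_live_status_py : Prop := ∀ (rows : List (List (String × String))), Dom_preferred_live_status_py rows → Spec_preferred_live_status_py rows (preferred_live_status_py rows)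

-- ===== LEMMAS AND PROOFS =====

-- lowering a character does not change whether it is whitespace
theorem pvIsspace_lowerChar (c : Char) :
    PySem.Chars.isspace (PySem.Chars.lowerChar c) = PySem.Chars.isspace c := by
  by_cases h : PySem.Chars.isupper c = true
  · have hb : 65 ≤ c.toNat ∧ c.toNat ≤ 90 := by
      simpa [PySem.Chars.isupper, Char.le_def, UInt32.le_iff_toNat_le] using h
    have hv : (Char.ofNat (c.toNat + 32)).toNat = c.toNat + 32 := by
      rw [Char.toNat_ofNat, if_pos (Or.inl (by omega))]
    have hin : PySem.Chars.lowerChar c = Char.ofNat (c.toNat + 32) := by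
      unfold PySem.Chars.lowerChar; rw [if_pos h]
    have hA : PySem.Chars.isspace c = false := by
      simp [PySem.Chars.isspace]; omega
    have hB : PySem.Chars.isspace (Char.ofNat (c.toNat + 32)) = false := by
      simp [PySem.Chars.isspace, hv]; omega
    rw [hin, hA, hB]
  · have hin : PySem.Chars.lowerChar c = c := by
      unfold PySem.Chars.lowerChar; rw [if_neg h]
    rw [hin]

theorem pvLowerChar_idem (c : Char) :
    PySem.Chars.lowerChar (PySem.Chars.lowerChar c) = PySem.Chars.lowerChar c := by
  by_cases h : PySem.Chars.isupper c = true
  · have hb : 65 ≤ c.toNat ∧ c.toNat ≤ 90 := by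
      simpa [PySem.Chars.isupper, Char.le_def, UInt32.le_iff_toNat_le] using h
    have hv : (Char.ofNat (c.toNat + 32)).toNat = c.toNat + 32 := by
      rw [Char.toNat_ofNat, if_pos (Or.inl (by omega))]
    have h2 : PySem.Chars.isupper (Char.ofNat (c.toNat + 32)) = false := by
      simp [PySem.Chars.isupper, Char.le_def, UInt32.le_iff_toNat_le, hv]; omega
    have hin : PySem.Chars.lowerChar c = Char.ofNat (c.toNat + 32) := by
      unfold PySem.Chars.lowerChar; rw [if_pos h]
    rw [hin]
    unfold PySem.Chars.lowerChar
    rw [h2]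
    simp
  · have hin : PySem.Chars.lowerChar c = c := by
      unfold PySem.Chars.lowerChar; rw [if_neg h]
    rw [hin, hin]

theorem pvIsspace_comp :
    (PySem.Chars.isspace ∘ PySem.Chars.lowerChar) = PySem.Chars.isspace :=
  funext fun c => pvIsspace_lowerChar c

theorem pvDropWhile_idem {α : Type} (p : α → Bool) (l : List α) :
    List.dropWhile p (List.dropWhile p l) = List.dropWhile p l := by
  induction l with
  | nil => rfl
  | cons a t ih =>
      by_cases h : p a = true
      · simp [h, ih]
      · simp [h]

theorem pvDropWhile_of_prefix {α : Type} (p : α → Bool) {l y : List α}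
    (h : y <+: List.dropWhile p l) : List.dropWhile p y = y := by
  cases y with
  | nil => rfl
  | cons a t =>
      obtain ⟨r, hr⟩ := h
      have hne : List.dropWhile p l ≠ [] := by rw [← hr]; simp
      have hhd := List.head_dropWhile_not p hne
      have ha : p a = false := by
        have he : (List.dropWhile p l).head hne = a := by simp [← hr]
        rwa [he] at hhd
      simp [ha]

theorem pvRstrip_prefix (l : List Char) : PySem.Chars.rstrip l <+: l := by
  unfold PySem.Chars.rstrip
  conv_rhs => rw [← List.reverse_reverse l]
  exact List.reverse_prefix.mpr (List.dropWhile_suffix _)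

theorem pvRstrip_idem (l : List Char) :
    PySem.Chars.rstrip (PySem.Chars.rstrip l) = PySem.Chars.rstrip l := by
  unfold PySem.Chars.rstrip
  rw [List.reverse_reverse, pvDropWhile_idem]

theorem pvStrip_idem (l : List Char) :
    PySem.Chars.strip (PySem.Chars.strip l) = PySem.Chars.strip l := by
  unfold PySem.Chars.strip PySem.Chars.lstrip
  have h1 : List.dropWhile PySem.Chars.isspace
      (PySem.Chars.rstrip (List.dropWhile PySem.Chars.isspace l)) =
      PySem.Chars.rstrip (List.dropWhile PySem.Chars.isspace l) :=
    pvDropWhile_of_prefix _ (pvRstrip_prefix _)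
  rw [h1, pvRstrip_idem]

theorem pvStrip_lower (l : List Char) :
    PySem.Chars.strip (PySem.Chars.lower l) = PySem.Chars.lower (PySem.Chars.strip l) := by
  unfold PySem.Chars.strip PySem.Chars.lstrip PySem.Chars.rstrip PySem.Chars.lower
  rw [List.dropWhile_map, pvIsspace_comp, ← List.map_reverse, List.dropWhile_map,
    pvIsspace_comp, List.map_reverse]

theorem pvLower_idem (l : List Char) :
    PySem.Chars.lower (PySem.Chars.lower l) = PySem.Chars.lower l := by
  unfold PySem.Chars.lower
  have h : (PySem.Chars.lowerChar ∘ PySem.Chars.lowerChar) = PySem.Chars.lowerChar :=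
    funext pvLowerChar_idem
  rw [List.map_map, h]

-- normalization (strip then lower) is idempotent
theorem pvNorm_idem (s : String) :
    PySem.Str.lower (PySem.Str.strip (PySem.Str.lower (PySem.Str.strip s))) =
      PySem.Str.lower (PySem.Str.strip s) := by
  apply String.ext
  simp [PySem.Str.lower, PySem.Str.strip]
  rw [pvStrip_lower, pvLower_idem, pvStrip_idem]

-- rank of an already-normalized candidate
theorem pvRank_cand (row : List (String × String)) :
    pvStatusRank (pvCandidate row) = if pvCandidate row = "queued" then 0 else 1 := by
  unfold pvStatusRank
  by_cases h0 : pvCandidate row = ""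
  · rw [if_pos h0, h0]
    decide
  · rw [if_neg h0]
    unfold pvCandidate at h0 ⊢
    rw [pvNorm_idem]

-- front-first early-exit search (the shape of B's loop, as an Option)
def pvPickF : List (List (String × String)) → Option String
  | [] => none
  | row :: rest =>
      if pvCandidate row ≠ "" ∧ pvCandidate row ≠ "queued" then some (pvCandidate row)
      else pvPickF rest

theorem pvAltGo_eq (xs : List (List (String × String))) :
    pvAltGo xs = (pvPickF xs).getD "running" := by
  induction xs with
  | nil => rfl
  | cons r rest ih =>
      by_cases h : pvCandidate r ≠ "" ∧ pvCandidate r ≠ "queued"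
      · simp [pvAltGo, pvPickF, h]
      · simp [pvAltGo, pvPickF, h, ih]

theorem pvPickF_append (xs ys : List (List (String × String))) :
    pvPickF (xs ++ ys) = (pvPickF xs).or (pvPickF ys) := by
  induction xs with
  | nil => simp [pvPickF]
  | cons r rest ih =>
      by_cases h : pvCandidate r ≠ "" ∧ pvCandidate r ≠ "queued"
      · simp [pvPickF, h]
      · simp [pvPickF, h, ih]

theorem pvStep (w : String) (r : List (String × String)) :
    pvLoopBody (w, 1) r
      = (if pvCandidate r ≠ "" ∧ pvCandidate r ≠ "queued" then (pvCandidate r, 1)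
         else (w, 1)) := by
  by_cases h0 : pvCandidate r = ""
  · simp [pvLoopBody, h0]
  · by_cases hq : pvCandidate r = "queued"
    · have h1 : pvStatusRank "queued" = 0 := by decide
      simp [pvLoopBody, hq, h1]
    · simp [pvLoopBody, pvRank_cand, h0, hq]

theorem pvFoldl_eq (rows : List (List (String × String))) : ∀ (w : String),
    (rows.foldl pvLoopBody (w, 1)).1 = (pvPickF rows.reverse).getD w := by
  induction rows with
  | nil => intro w; rfl
  | cons r rest ih =>
      intro w
      rw [List.foldl_cons, pvStep, List.reverse_cons, pvPickF_append]
      by_cases hg : pvCandidate r ≠ "" ∧ pvCandidate r ≠ "queued"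
      · rw [if_pos hg, ih]
        have hone : pvPickF [r] = some (pvCandidate r) := by simp [pvPickF, hg]
        rw [hone]
        cases pvPickF rest.reverse <;> simp
      · rw [if_neg hg, ih]
        have hnone : pvPickF [r] = none := by simp [pvPickF, hg]
        rw [hnone, Option.or_none]

-- ===== VERDICT (by name: the statement is the Claim_ definition above) =====
theorem preferred_live_status_py_spec : Claim_equal_preferred_live_status_py := by
  intro rows _
  unfold Spec_preferred_live_status_py preferred_live_status_py preferred_live_status_py_alt
  have h1 : pvStatusRank "running" = 1 := by decide
  rw [h1, pvFoldl_eq, pvAltGo_eq]
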